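-- pv_equiv track=rewrite | github.com/Akchiche-Mohamed-Aymen/ai-house-price-prediction-compare-algorithms- | utils.py | clean_set
-- ===== SOURCE A (Python) =====
-- def clean_set(summary_corr , mul_corr):
--     saved = list()
--     for e in summary_corr:
--         for ele in mul_corr:
--             if e in ele:
--                 saved.append(e)
--                 break
--     for e in saved :
--         if e in summary_corr:
--             summary_corr.remove(e)
--     return summary_corr
-- ===== SOURCE B (Python) =====
-- def clean_set(summary_corr, mul_corr):
--     # Single filtering pass; slice assignment keeps A's in-place mutation and identity.
--     summary_corr[:] = [e for e in summary_corr
--                        if not any(e in ele for ele in mul_corr)]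
--     return summary_corr
-- ===== Notes on version B (the rewrite author's own statement) =====
-- stated objective: simpler
-- what changed: Replaces A's two-phase collect-into-saved-then-remove structure (with repeated list.remove scans) by one filtering pass that keeps elements not contained in any mul_corr group, assigned back in place.
import Mathlib
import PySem

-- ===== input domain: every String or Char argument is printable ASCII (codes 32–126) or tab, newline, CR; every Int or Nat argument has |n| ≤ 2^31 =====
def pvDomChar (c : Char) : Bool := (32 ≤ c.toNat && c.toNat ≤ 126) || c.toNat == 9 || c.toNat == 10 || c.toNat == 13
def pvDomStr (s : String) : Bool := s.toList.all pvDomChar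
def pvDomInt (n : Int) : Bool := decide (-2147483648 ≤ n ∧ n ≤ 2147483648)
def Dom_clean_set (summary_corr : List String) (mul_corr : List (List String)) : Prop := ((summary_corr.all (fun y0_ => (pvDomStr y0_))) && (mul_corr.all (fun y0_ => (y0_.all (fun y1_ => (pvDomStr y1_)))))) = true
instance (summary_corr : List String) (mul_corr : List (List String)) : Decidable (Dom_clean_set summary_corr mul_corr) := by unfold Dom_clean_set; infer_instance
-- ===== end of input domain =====

-- B replaces A's collect-into-saved-then-remove phases by one filtering pass (simpler);
-- A mutates summary_corr in place and B preserves that via slice assignment — equivalence here is about the return value.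
-- ===== PORT A =====
def clean_set (summary_corr : List String) (mul_corr : List (List String)) : List String :=
  -- first loop (inner loop with break ≡ any): saved collects the e found in some group
  let saved := summary_corr.foldl
    (fun acc e => if mul_corr.any (fun ele => ele.contains e) then acc ++ [e] else acc) []
  -- second loop: remove first occurrence of each saved e (guarded by membership, so remove? succeeds)
  saved.foldl
    (fun cur e => if cur.contains e then (PySem.List.remove? cur e).getD cur else cur)
    summary_corr

-- ===== PORT B =====
def clean_set_alt (summary_corr : List String) (mul_corr : List (List String)) : List String :=
  summary_corr.filter (fun e => !(mul_corr.any (fun ele => ele.contains e)))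

-- ===== PRECONDITION & SPEC =====
def Spec_clean_set (summary_corr : List String) (mul_corr : List (List String)) (out : List String) : Prop := out = clean_set_alt summary_corr mul_corr
instance (summary_corr : List String) (mul_corr : List (List String)) (out : List String) : Decidable (Spec_clean_set summary_corr mul_corr out) := by unfold Spec_clean_set; infer_instance

-- ===== CLAIM (what is proved, stated in full; the proofs are below) =====
def Claim_equal_clean_set : Prop := ∀ (summary_corr : List String) (mul_corr : List (List String)), Dom_clean_set summary_corr mul_corr → Spec_clean_set summary_corr mul_corr (clean_set summary_corr mul_corr)

-- ===== LEMMAS AND PROOFS =====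

-- ===== VERDICT (by name: the statement is the Claim_ definition above) =====
-- the removal loop is the fold of List.erase, i.e. List.diff
theorem pv_removeLoop_eq_diff (t s : List String) :
    t.foldl (fun cur e => if cur.contains e then (PySem.List.remove? cur e).getD cur else cur) s
      = s.diff t := by
  induction t generalizing s with
  | nil => simp [List.diff]
  | cons a t ih =>
      have hstep : (if s.contains a then (PySem.List.remove? s a).getD s else s) = s.erase a := by
        by_cases h : a ∈ s
        · simp [h, PySem.List.remove?_eq_some_erase s a h]
        · simp [List.contains_eq_mem, h, List.erase_of_not_mem h]
      simp only [List.foldl_cons, List.diff_cons, hstep, ih]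

-- deleting from l exactly the sublist of elements satisfying p leaves the elements not satisfying p
theorem pv_diff_filter (p : String → Bool) (l : List String) :
    l.diff (l.filter p) = l.filter (fun e => !p e) := by
  induction l with
  | nil => simp
  | cons a l ih =>
      by_cases h : p a
      · simp [h, List.diff_cons, ih]
      · have hnm : a ∉ l.filter p := by
          simp only [List.mem_filter]
          rintro ⟨-, hp⟩; exact h hp
        rw [List.filter_cons_of_neg (by simp [h]), List.cons_diff_of_not_mem hnm,
            List.filter_cons_of_pos (by simp [h]), ih]

theorem clean_set_spec : Claim_equal_clean_set := by
  intro summary_corr mul_corr _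
  unfold Spec_clean_set clean_set clean_set_alt
  rw [PySem.List.foldl_append_if_eq_filter, List.nil_append,
      pv_removeLoop_eq_diff, pv_diff_filter]
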